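-- pv_equiv track=rewrite | github.com/YhMr2005/Programming1_Oplossingen_Dodona | Extra Oefeningen (31 van 38)/ritsen.py | weven
-- ===== SOURCE A (Python) =====
-- def weven(arr1, arr2):
--     '''
--     Waarschijnlijk kan dit veel eenvoudiger en eleganter opgelost worden,
--     maar onderstaande code werkt en ik heb geen zin om er verder over na te denken.
--     '''
--     lijst_1 = list(arr1)
--     lijst_2 = list(arr2)
--     uitvoer = []
--     for i in range(max(len(lijst_1), len(lijst_2))):
--         if i > len(lijst_1)-1:
--             if len(lijst_1) == 1:
--                 j = 0
--             else:
--                 j = i - (len(lijst_1))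
--                 while j > len(lijst_1)-1:
--                     j -= len(lijst_1)
--         else:
--             j = i
--         uitvoer.append(lijst_1[j])
--
--         if i > len(lijst_2)-1:
--             if len(lijst_2) == 1:
--                 j = 0
--             else:
--                 j = i - (len(lijst_2))
--                 while j > len(lijst_2)-1:
--                     j -= len(lijst_2)
--         else:
--             j = i
--         uitvoer.append(lijst_2[j])
--
--     return uitvoer
-- ===== SOURCE B (Python) =====
-- def weven(arr1, arr2):
--     l1 = list(arr1)
--     l2 = list(arr2)
--     it1 = iter(l1)
--     it2 = iter(l2)
--     uitvoer = []
--     for _ in range(max(len(l1), len(l2))):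
--         try:
--             x = next(it1)
--         except StopIteration:
--             it1 = iter(l1)
--             x = next(it1)
--         try:
--             y = next(it2)
--         except StopIteration:
--             it2 = iter(l2)
--             y = next(it2)
--         uitvoer.append(x)
--         uitvoer.append(y)
--     return uitvoer
-- ===== Notes on version B (the rewrite author's own statement) =====
-- stated objective: alternative
-- what changed: A computes each element by index arithmetic with a hand-rolled repeated-subtraction wrap-around; B performs no indexing at all, instead maintaining two cyclic iterators that it consumes element by element and restarts whenever exhausted.
import Mathlib
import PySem

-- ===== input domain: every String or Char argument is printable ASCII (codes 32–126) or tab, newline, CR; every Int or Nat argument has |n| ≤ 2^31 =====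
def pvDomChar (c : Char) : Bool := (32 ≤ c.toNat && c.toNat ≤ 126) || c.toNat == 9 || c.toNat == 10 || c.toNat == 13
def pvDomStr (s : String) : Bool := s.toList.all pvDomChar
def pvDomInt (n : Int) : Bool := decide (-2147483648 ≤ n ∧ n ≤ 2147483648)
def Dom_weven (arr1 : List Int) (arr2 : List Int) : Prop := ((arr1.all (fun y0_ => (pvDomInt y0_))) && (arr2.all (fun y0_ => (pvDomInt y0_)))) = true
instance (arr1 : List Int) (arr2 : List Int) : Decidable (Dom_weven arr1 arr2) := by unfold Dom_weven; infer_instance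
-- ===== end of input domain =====

-- B replaces A's index loop with hand-rolled repeated-subtraction wrap-around by two
-- cyclic iterators consumed element by element and restarted when exhausted: objective = alternative.

-- ===== PORT A =====
-- Python's 'while j > len-1: j -= len'; fuel makes it total in Lean (the loop
-- diverges in Python exactly when len = 0, which Pre_weven excludes).
def wrapWhile (fuel : Nat) (j len : Int) : Int :=
  match fuel with
  | 0 => j
  | f + 1 => if j > len - 1 then wrapWhile f (j - len) len else j

def weven (arr1 : List Int) (arr2 : List Int) : List Int :=
  let lijst1 := arr1
  let lijst2 := arr2
  (PySem.List.pyRange 0 (max (lijst1.length : Int) (lijst2.length : Int)) 1).foldl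
    (fun uitvoer i =>
      let j1 : Int :=
        if i > (lijst1.length : Int) - 1 then
          if lijst1.length = 1 then 0
          else wrapWhile (i - (lijst1.length : Int)).natAbs.succ (i - (lijst1.length : Int)) (lijst1.length : Int)
        else i
      let uitvoer := uitvoer ++ [PySem.List.pyGetD lijst1 j1 0]
      let j2 : Int :=
        if i > (lijst2.length : Int) - 1 then
          if lijst2.length = 1 then 0
          else wrapWhile (i - (lijst2.length : Int)).natAbs.succ (i - (lijst2.length : Int)) (lijst2.length : Int)
        else i
      uitvoer ++ [PySem.List.pyGetD lijst2 j2 0]) []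

-- ===== PORT B =====
-- 'next(it)' with refill: an iterator over a list is its remaining suffix; 'next' on an
-- exhausted iterator triggers the except-branch, which restarts from the whole list.
-- (headD 0 models next(iter(l)): reachable with l = [] only outside Pre_weven, where Python raises.)
def weven_alt (arr1 : List Int) (arr2 : List Int) : List Int :=
  let l1 := arr1
  let l2 := arr2
  let res := (PySem.List.pyRange 0 (max (l1.length : Int) (l2.length : Int)) 1).foldl
    (fun (st : List Int × List Int × List Int) _ =>
      let p1 := match st.2.1 with
        | [] => (l1.headD 0, l1.drop 1)
        | a :: r => (a, r)
      let p2 := match st.2.2 with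
        | [] => (l2.headD 0, l2.drop 1)
        | a :: r => (a, r)
      (st.1 ++ [p1.1] ++ [p2.1], p1.2, p2.2))
    ([], l1, l2)
  res.1

-- ===== PRECONDITION & SPEC =====
-- Pre_ excludes exactly the inputs where one list is empty and the other is not:
-- there A's inner 'while j > -1: j -= 0' loops forever (A never returns; B raises StopIteration).
def Pre_weven (arr1 : List Int) (arr2 : List Int) : Prop := (arr1 = [] ↔ arr2 = [])
instance (arr1 : List Int) (arr2 : List Int) : Decidable (Pre_weven arr1 arr2) := by unfold Pre_weven; infer_instance
def pvWitness_weven : List Int × List Int := ([1, 2, 3], [4, 5])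

def Spec_weven (arr1 : List Int) (arr2 : List Int) (out : List Int) : Prop := out = weven_alt arr1 arr2
instance (arr1 : List Int) (arr2 : List Int) (out : List Int) : Decidable (Spec_weven arr1 arr2 out) := by unfold Spec_weven; infer_instance

-- ===== CLAIM (what is proved, stated in full; the proofs are below) =====
def Claim_equal_weven : Prop := ∀ (arr1 : List Int) (arr2 : List Int), Dom_weven arr1 arr2 → Pre_weven arr1 arr2 → Spec_weven arr1 arr2 (weven arr1 arr2)

-- ===== LEMMAS AND PROOFS =====

-- the common characterisation both ports are reduced to
def specOut (l1 l2 : List Int) (k : Nat) : List Int :=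
  (List.range k).flatMap (fun i => [l1.getD (i % l1.length) 0, l2.getD (i % l2.length) 0])

-- position of B's iterator in l after k steps (len = l.length > 0)
def wp (k len : Nat) : Nat := if k = 0 then 0 else (k - 1) % len + 1

-- B's per-iterator action: take the next element, refilling if exhausted
def pick (l r : List Int) : Int × List Int :=
  match r with
  | [] => (l.headD 0, l.drop 1)
  | a :: rest => (a, rest)

-- B's loop body as a function of the state
def bStep (l1 l2 : List Int) (st : List Int × List Int × List Int) :
    List Int × List Int × List Int :=
  (st.1 ++ [(pick l1 st.2.1).1] ++ [(pick l2 st.2.2).1], (pick l1 st.2.1).2, (pick l2 st.2.2).2)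

theorem wrapWhile_eq (fuel : Nat) (j len : Int) (hl : 0 < len) (hj : 0 ≤ j)
    (hf : j < fuel) : wrapWhile fuel j len = j % len := by
  induction fuel generalizing j with
  | zero => omega
  | succ f ih =>
    unfold wrapWhile
    split_ifs with h
    · rw [ih (j - len) (by omega) (by omega)]
      exact Int.sub_emod_right j len
    · exact (Int.emod_eq_of_lt hj (by omega)).symm

theorem wrapIdx_eq (i : Int) (len : Nat) (hl : 0 < len) (hi : 0 ≤ i) :
    (if i > (len : Int) - 1 then
      if len = 1 then 0
      else wrapWhile (i - (len : Int)).natAbs.succ (i - (len : Int)) (len : Int)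
    else i) = i % (len : Int) := by
  split_ifs with h h1
  · subst h1; simp
  · rw [wrapWhile_eq _ _ _ (by exact_mod_cast hl) (by omega) (by omega)]
    exact Int.sub_emod_right i len
  · exact (Int.emod_eq_of_lt hi (by omega)).symm

theorem foldl_pairs {α : Type} (xs : List Int) (a b : Int → α) (acc : List α) :
    xs.foldl (fun acc i => (acc ++ [a i]) ++ [b i]) acc
      = acc ++ xs.flatMap (fun i => [a i, b i]) := by
  induction xs generalizing acc with
  | nil => simp
  | cons x xs ih => simp [List.flatMap]

theorem flatMap_congr_mem {α β : Type} (xs : List α) (f g : α → List β)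
    (h : ∀ x ∈ xs, f x = g x) : xs.flatMap f = xs.flatMap g := by
  induction xs with
  | nil => rfl
  | cons x xs ih =>
    simp only [List.flatMap_cons]
    rw [h x (by simp), ih (fun y hy => h y (by simp [hy]))]

-- a fold whose function ignores the elements is an iterate of its step
theorem foldl_const {α : Type} (g : α → α) (xs : List Int) (init : α) :
    xs.foldl (fun s _ => g s) init = g^[xs.length] init := by
  induction xs generalizing init with
  | nil => rfl
  | cons x xs ih => simp [ih, Function.iterate_succ_apply]

theorem wp_le (k len : Nat) (hl : 0 < len) : wp k len ≤ len := by
  unfold wp; split_ifs with h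
  · omega
  · have := Nat.mod_lt (k - 1) hl; omega

theorem wp_eq_mod (k len : Nat) (hlt : wp k len < len) :
    wp k len = k % len := by
  by_cases h : k = 0
  · subst h; unfold wp; simp
  · unfold wp at hlt ⊢
    rw [if_neg h] at hlt ⊢
    have hdiv := Nat.div_add_mod (k - 1) len
    generalize hm : len * ((k - 1) / len) = m at hdiv
    have hgoal : (m + ((k - 1) % len + 1)) % len = (k - 1) % len + 1 := by
      rw [← hm, Nat.mul_add_mod, Nat.mod_eq_of_lt hlt]
    have hk' : m + ((k - 1) % len + 1) = k := by omega
    rw [hk'] at hgoal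
    omega

theorem wp_full_mod (k len : Nat) (hl : 0 < len) (hfull : wp k len = len) :
    k % len = 0 ∧ k ≠ 0 := by
  unfold wp at hfull
  split_ifs at hfull with h
  · omega
  · have hdiv := Nat.div_add_mod (k - 1) len
    generalize hm : len * ((k - 1) / len) = m at hdiv
    have hk' : k = m + len := by omega
    constructor
    · rw [hk', ← hm, Nat.mul_add_mod, Nat.mod_self]
    · exact h

-- B's per-iterator action, characterised at the invariant state
theorem pick_drop (l : List Int) (hl : l ≠ []) (k : Nat) :
    pick l (l.drop (wp k l.length))
      = (l.getD (k % l.length) 0, l.drop (wp (k + 1) l.length)) := by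
  have hlen : 0 < l.length := List.length_pos_iff.mpr hl
  by_cases hfull : wp k l.length = l.length
  · -- iterator exhausted: refill from the whole list
    obtain ⟨hk0, hk⟩ := wp_full_mod k l.length hlen hfull
    have hdrop : l.drop (wp k l.length) = [] := by rw [hfull]; simp
    have hwp1 : wp (k + 1) l.length = 1 := by
      have hL : wp (k + 1) l.length = k % l.length + 1 := by unfold wp; simp
      omega
    rw [hdrop, hk0, hwp1]
    cases l with
    | nil => exact absurd rfl hl
    | cons a r => simp [pick]
  · -- iterator still has elements
    have hlt : wp k l.length < l.length := lt_of_le_of_ne (wp_le k l.length hlen) hfull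
    have heq : wp k l.length = k % l.length := wp_eq_mod k l.length hlt
    have hwp1 : wp (k + 1) l.length = wp k l.length + 1 := by
      by_cases hk : k = 0
      · subst hk; unfold wp; simp [Nat.mod_eq_of_lt hlen]
      · have hwpk : wp k l.length = (k - 1) % l.length + 1 := by unfold wp; simp [hk]
        have hL : wp (k + 1) l.length = k % l.length + 1 := by unfold wp; simp
        omega
    have hdrop : l.drop (wp k l.length) = l[wp k l.length] :: l.drop (wp k l.length + 1) :=
      List.drop_eq_getElem_cons hlt
    have hkl : k % l.length < l.length := heq ▸ hlt
    have hg : l[wp k l.length]'hlt = l.getD (k % l.length) 0 := by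
      rw [List.getD_eq_getElem l 0 hkl]
      simp only [heq]
    rw [hdrop]
    simp [pick, hg, hwp1]

theorem bStep_invariant (l1 l2 : List Int) (h1 : l1 ≠ []) (h2 : l2 ≠ []) (k : Nat) :
    (bStep l1 l2)^[k] ([], l1, l2)
      = (specOut l1 l2 k, l1.drop (wp k l1.length), l2.drop (wp k l2.length)) := by
  induction k with
  | zero => simp [specOut, wp]
  | succ k ih =>
    rw [Function.iterate_succ_apply', ih]
    have hout : specOut l1 l2 k ++ [l1.getD (k % l1.length) 0] ++ [l2.getD (k % l2.length) 0]
        = specOut l1 l2 (k + 1) := by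
      unfold specOut
      rw [List.range_succ, List.flatMap_append]
      simp
    simp only [bStep]
    rw [pick_drop l1 h1 k, pick_drop l2 h2 k, ← hout]

-- A reduces to specOut
theorem weven_eq_specOut (l1 l2 : List Int) (h1 : l1 ≠ []) (h2 : l2 ≠ []) :
    weven l1 l2 = specOut l1 l2 (max l1.length l2.length) := by
  have hl1 : 0 < l1.length := List.length_pos_iff.mpr h1
  have hl2 : 0 < l2.length := List.length_pos_iff.mpr h2
  unfold weven specOut
  simp only []
  rw [foldl_pairs, List.nil_append]
  have hmax : (max (l1.length : Int) (l2.length : Int)) = ((max l1.length l2.length : Nat) : Int) := by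
    push_cast; rfl
  rw [hmax, PySem.List.pyRange_zero_natCast, List.flatMap_map]
  apply flatMap_congr_mem
  intro k hk
  have hkn : (0 : Int) ≤ (k : Int) := Int.natCast_nonneg k
  rw [wrapIdx_eq (k : Int) l1.length hl1 hkn, wrapIdx_eq (k : Int) l2.length hl2 hkn]
  have e1 : ((k : Int) % (l1.length : Int)) = ((k % l1.length : Nat) : Int) := by push_cast; rfl
  have e2 : ((k : Int) % (l2.length : Int)) = ((k % l2.length : Nat) : Int) := by push_cast; rfl
  rw [e1, e2, PySem.List.pyGetD_natCast, PySem.List.pyGetD_natCast]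

-- B reduces to specOut
theorem weven_alt_eq_specOut (l1 l2 : List Int) (h1 : l1 ≠ []) (h2 : l2 ≠ []) :
    weven_alt l1 l2 = specOut l1 l2 (max l1.length l2.length) := by
  show ((PySem.List.pyRange 0 (max (l1.length : Int) (l2.length : Int)) 1).foldl
      (fun st _ => bStep l1 l2 st) ([], l1, l2)).1 = _
  have hmax : (max (l1.length : Int) (l2.length : Int)) = ((max l1.length l2.length : Nat) : Int) := by
    push_cast; rfl
  rw [hmax, foldl_const (bStep l1 l2), PySem.List.length_pyRange_one]
  simp only [Int.sub_zero, Int.toNat_natCast]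
  rw [bStep_invariant l1 l2 h1 h2]

-- ===== VERDICT (by name: the statement is the Claim_ definition above) =====
theorem weven_spec : Claim_equal_weven := by
  intro arr1 arr2 _ hpre
  unfold Spec_weven
  by_cases h1 : arr1 = []
  · have h2 : arr2 = [] := hpre.mp h1
    subst h1 h2; rfl
  · have h2 : arr2 ≠ [] := fun h => h1 (hpre.mpr h)
    rw [weven_eq_specOut arr1 arr2 h1 h2, weven_alt_eq_specOut arr1 arr2 h1 h2]
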